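-- pv_equiv track=rewrite | github.com/sangeethasanthiralingam/DB-Report-chat-app | opendai.py | identify_business_domain
-- ===== SOURCE A (Python) =====
-- def identify_business_domain(schema_info):
--     """Identify business domain from schema_info (simple heuristic)"""
--     # Heuristic: look for key tables
--     tables = set(schema_info.get('tables', {}).keys())
--     if any(t.startswith('hr_') or t in ['employees', 'attendance_records', 'leave_requests'] for t in tables):
--         return 'hr'
--     if any(t.startswith('inv_') or t in ['products', 'sales', 'stock_levels'] for t in tables):
--         return 'inventory'
--     if any(t.startswith('core_fin_') or t in ['accounts', 'transactions', 'payments'] for t in tables):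
--         return 'financial'
--     return 'general'
-- ===== SOURCE B (Python) =====
-- def identify_business_domain(schema_info):
--     """Identify business domain from schema_info (simple heuristic)"""
--     # One pass over the table names, keeping a flag per domain; then resolve by priority.
--     hr = inv = fin = False
--     for t in schema_info.get('tables', {}):
--         hr = hr or t.startswith('hr_') or t in ('employees', 'attendance_records', 'leave_requests')
--         inv = inv or t.startswith('inv_') or t in ('products', 'sales', 'stock_levels')
--         fin = fin or t.startswith('core_fin_') or t in ('accounts', 'transactions', 'payments')
--     return 'hr' if hr else 'inventory' if inv else 'financial' if fin else 'general'
-- ===== Notes on version B (the rewrite author's own statement) =====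
-- stated objective: alternative
-- what changed: Replaced A's three separate existence scans over a set of table names by a single pass over the names that accumulates one boolean flag per domain, followed by a fixed hr>inventory>financial>general priority decision.
import Mathlib
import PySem

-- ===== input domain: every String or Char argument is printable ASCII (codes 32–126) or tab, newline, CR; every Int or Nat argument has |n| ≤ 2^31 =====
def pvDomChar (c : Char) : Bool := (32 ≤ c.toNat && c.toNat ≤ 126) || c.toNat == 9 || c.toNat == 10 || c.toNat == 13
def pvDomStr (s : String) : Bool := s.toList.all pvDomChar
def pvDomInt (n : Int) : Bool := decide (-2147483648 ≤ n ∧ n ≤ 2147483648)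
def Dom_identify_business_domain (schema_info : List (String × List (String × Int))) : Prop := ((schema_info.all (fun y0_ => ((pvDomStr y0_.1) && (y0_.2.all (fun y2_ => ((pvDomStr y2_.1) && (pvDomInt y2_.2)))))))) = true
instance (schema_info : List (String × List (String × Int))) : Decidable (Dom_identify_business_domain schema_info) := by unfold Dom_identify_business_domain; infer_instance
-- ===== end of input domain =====

-- B replaces A's three separate existence scans with a single pass over the table names
-- accumulating one flag per domain, then a fixed priority decision (objective: alternative).


-- table-classification predicates (identical text in both Pythons)
def isHrTable (t : String) : Bool :=
  PySem.Str.startswith t "hr_" || ["employees", "attendance_records", "leave_requests"].contains t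
def isInvTable (t : String) : Bool :=
  PySem.Str.startswith t "inv_" || ["products", "sales", "stock_levels"].contains t
def isFinTable (t : String) : Bool :=
  PySem.Str.startswith t "core_fin_" || ["accounts", "transactions", "payments"].contains t

-- ===== PORT A =====
def identify_business_domain (schema_info : List (String × List (String × Int))) : String :=
  let tables : PySem.Set String :=
    PySem.Set.ofList (((PySem.Dict.mk schema_info).getD "tables" []).map Prod.fst)
  if tables.any isHrTable then "hr"
  else if tables.any isInvTable then "inventory"
  else if tables.any isFinTable then "financial"
  else "general"

-- ===== PORT B =====
def identify_business_domain_alt (schema_info : List (String × List (String × Int))) : String :=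
  let flags := (((PySem.Dict.mk schema_info).getD "tables" []).map Prod.fst).foldl
    (fun (acc : Bool × Bool × Bool) t =>
      (acc.1 || isHrTable t, acc.2.1 || isInvTable t, acc.2.2 || isFinTable t))
    (false, false, false)
  if flags.1 then "hr"
  else if flags.2.1 then "inventory"
  else if flags.2.2 then "financial"
  else "general"

-- ===== PRECONDITION & SPEC =====
def Spec_identify_business_domain (schema_info : List (String × List (String × Int))) (out : String) : Prop := out = identify_business_domain_alt schema_info
instance (schema_info : List (String × List (String × Int))) (out : String) : Decidable (Spec_identify_business_domain schema_info out) := by unfold Spec_identify_business_domain; infer_instance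

-- ===== CLAIM (what is proved, stated in full; the proofs are below) =====
def Claim_equal_identify_business_domain : Prop := ∀ (schema_info : List (String × List (String × Int))), Dom_identify_business_domain schema_info → Spec_identify_business_domain schema_info (identify_business_domain schema_info)

-- ===== LEMMAS AND PROOFS =====

theorem any_ofList_eq {α : Type} [BEq α] [LawfulBEq α] (xs : List α) (p : α → Bool) :
    (PySem.Set.ofList xs).any p = xs.any p := by
  rcases h : (PySem.Set.ofList xs).any p with _ | _
  · symm
    rw [List.any_eq_false] at h ⊢
    intro x hx
    exact h x ((PySem.Set.mem_ofList _ _).2 hx)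
  · symm
    rw [List.any_eq_true] at h ⊢
    obtain ⟨x, hx, hp⟩ := h
    exact ⟨x, (PySem.Set.mem_ofList _ _).1 hx, hp⟩

theorem foldl_flags (xs : List String) (a b c : Bool) :
    xs.foldl (fun (acc : Bool × Bool × Bool) t =>
      (acc.1 || isHrTable t, acc.2.1 || isInvTable t, acc.2.2 || isFinTable t)) (a, b, c)
    = (a || xs.any isHrTable, b || xs.any isInvTable, c || xs.any isFinTable) := by
  induction xs generalizing a b c with
  | nil => simp
  | cons x xs ih => simp [List.foldl_cons, ih, Bool.or_assoc]

-- ===== VERDICT (by name: the statement is the Claim_ definition above) =====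
theorem identify_business_domain_spec : Claim_equal_identify_business_domain := by
  intro schema_info _
  unfold Spec_identify_business_domain identify_business_domain identify_business_domain_alt
  simp only [foldl_flags, any_ofList_eq, Bool.false_or]
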